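-- pv_equiv track=rewrite | github.com/sjk2915/jungleBaekjoon | 할거없어서푼거/단어 수학.py | longest_first_extraction
-- ===== SOURCE A (Python) =====
-- def longest_first_extraction(words):
--     str_ptr = [(i, 0) for i in range(len(words))]
--
--     queue = []
--     to_extract = sum(len(word) for word in words)
--     while len(queue) < to_extract:
--         str_ptr_idx = -1
--         max_remain_len = -1
--
--         for i, (word_idx, char_idx) in enumerate(str_ptr):
--             remain_len = len(words[word_idx]) - char_idx
--
--             if remain_len <= 0:
--                 continue
--
--             if remain_len > max_remain_len:
--                 max_remain_len = remain_len
--                 str_ptr_idx = i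
--
--         word_idx, char_idx = str_ptr[str_ptr_idx]
--         queue.append(words[word_idx][char_idx])
--         str_ptr[str_ptr_idx] = (word_idx, char_idx + 1)
--
--     return queue
-- ===== SOURCE B (Python) =====
-- def longest_first_extraction(words):
--     max_len = max(map(len, words), default=0)
--     return [w[len(w) - r] for r in range(max_len, 0, -1) for w in words if len(w) >= r]
-- ===== Notes on version B (the rewrite author's own statement) =====
-- stated objective: faster
-- what changed: Replaced the per-character linear scan for the word with most remaining characters by a closed-form double comprehension: remaining lengths only ever decrease, so the output is exactly, for each remaining-length r from max length down to 1, the character at position len(w)-r of every word with len(w) >= r, in input order.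
import Mathlib
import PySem

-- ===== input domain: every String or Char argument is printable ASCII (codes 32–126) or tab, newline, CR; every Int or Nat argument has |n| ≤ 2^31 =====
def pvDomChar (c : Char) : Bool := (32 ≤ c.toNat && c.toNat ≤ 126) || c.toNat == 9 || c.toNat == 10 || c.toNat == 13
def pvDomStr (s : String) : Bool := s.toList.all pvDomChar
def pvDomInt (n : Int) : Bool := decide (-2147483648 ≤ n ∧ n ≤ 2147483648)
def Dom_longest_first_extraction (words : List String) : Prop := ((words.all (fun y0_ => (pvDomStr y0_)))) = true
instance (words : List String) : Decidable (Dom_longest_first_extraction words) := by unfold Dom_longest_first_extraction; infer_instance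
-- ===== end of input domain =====

-- B replaces A's per-character rescan of all pointers by a closed-form double loop over
-- remaining-length values (faster in a timing run); return values proved equal.

-- ===== PORT A =====
-- inner 'for i, (word_idx, char_idx) in enumerate(str_ptr)' body (argmax scan state = (str_ptr_idx, max_remain_len))
def lfeStep (words : List String) (s : Int × Int) (p : Int × (Int × Int)) : Int × Int :=
  if PySem.Str.len ((PySem.List.pyGet? words p.2.1).getD "") - p.2.2 ≤ 0 then s
  else if PySem.Str.len ((PySem.List.pyGet? words p.2.1).getD "") - p.2.2 > s.2 then
    (p.1, PySem.Str.len ((PySem.List.pyGet? words p.2.1).getD "") - p.2.2)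
  else s

-- the 'while len(queue) < to_extract' loop; fuel = to_extract - len(queue) (each pass appends exactly one char)
def lfeLoop (words : List String) : List (Int × Int) → List String → Nat → List String
  | _, queue, 0 => queue
  | strPtr, queue, Nat.succ fuel =>
    let sel := (PySem.List.enumerate strPtr).foldl (lfeStep words) (-1, -1)
    match PySem.List.pyGet? strPtr sel.1 with
    | none => queue        -- unreachable: Python would raise IndexError here
    | some wc =>
      match PySem.List.pyGet? words wc.1 with
      | none => queue      -- unreachable guard for words[word_idx]
      | some w =>
        match PySem.Str.pyGet? w wc.2 with
        | none => queue    -- unreachable guard for words[word_idx][char_idx]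
        | some c =>
          let j := (if sel.1 < 0 then (strPtr.length : Int) + sel.1 else sel.1).toNat
          lfeLoop words (strPtr.set j (wc.1, wc.2 + 1)) (queue ++ [String.ofList [c]]) fuel

def longest_first_extraction (words : List String) : List String :=
  let strPtr := (PySem.List.pyRange 0 (words.length : Int) 1).map (fun i => (i, (0 : Int)))
  let toExtract := (words.map (fun w => PySem.Str.len w)).sum
  lfeLoop words strPtr [] toExtract.toNat

-- ===== PORT B =====
def longest_first_extraction_alt (words : List String) : List String :=
  let maxLen := (words.map PySem.Str.len).foldl max 0
  (PySem.List.pyRange maxLen 0 (-1)).flatMap (fun r =>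
    words.filterMap (fun w =>
      if PySem.Str.len w ≥ r then
        (PySem.Str.pyGet? w (PySem.Str.len w - r)).map (fun c => String.ofList [c])
      else none))

-- ===== PRECONDITION & SPEC =====
def Spec_longest_first_extraction (words : List String) (out : List String) : Prop := out = longest_first_extraction_alt words
instance (words : List String) (out : List String) : Decidable (Spec_longest_first_extraction words out) := by unfold Spec_longest_first_extraction; infer_instance

-- ===== CLAIM (what is proved, stated in full; the proofs are below) =====
def Claim_equal_longest_first_extraction : Prop := ∀ (words : List String), Dom_longest_first_extraction words → Spec_longest_first_extraction words (longest_first_extraction words)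

-- ===== LEMMAS AND PROOFS =====

-- pointer value of word w at "phase r", processed flag p (processed this phase = advanced one char)
def lfeChar (w : String) (r : Int) (p : Bool) : Int :=
  if r ≤ PySem.Str.len w then (if p then PySem.Str.len w - r + 1 else PySem.Str.len w - r) else 0

-- str_ptr at phase r, next word to serve = index k (absolute indices start at i0)
def lfeState (r k : Int) : List String → Int → List (Int × Int)
  | [], _ => []
  | w :: t, i0 => (i0, lfeChar w r (decide (i0 < k))) :: lfeState r k t (i0 + 1)

-- remaining characters from phase-r/next-k state
def lfeFuel (r k : Int) : List String → Int → Nat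
  | [], _ => 0
  | w :: t, i0 =>
    (if r ≤ PySem.Str.len w then (r - (if i0 < k then 1 else 0)).toNat else (PySem.Str.len w).toNat)
      + lfeFuel r k t (i0 + 1)

def lfePhase (r : Int) (ws : List String) : List String :=
  ws.filterMap (fun w =>
    if PySem.Str.len w ≥ r then
      (PySem.Str.pyGet? w (PySem.Str.len w - r)).map (fun c => String.ofList [c])
    else none)

def lfeRest (ws : List String) : Nat → List String
  | 0 => []
  | r + 1 => lfePhase (r + 1) ws ++ lfeRest ws r

theorem length_lfeState (r k : Int) (ws : List String) (i0 : Int) :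
    (lfeState r k ws i0).length = ws.length := by
  induction ws generalizing i0 with
  | nil => rfl
  | cons w t ih => simp [lfeState, ih]

theorem getElem_lfeState (r k : Int) (ws : List String) (i0 : Int) (j : Nat)
    (hj : j < ws.length) :
    (lfeState r k ws i0)[j]'(by simpa [length_lfeState] using hj)
      = (i0 + j, lfeChar ws[j] r (decide (i0 + j < k))) := by
  induction ws generalizing i0 j with
  | nil => simp at hj
  | cons w t ih =>
    cases j with
    | zero => simp [lfeState]
    | succ m =>
      have := ih (i0 + 1) m (by simpa using hj)
      simpa [lfeState, add_comm, add_assoc, add_left_comm] using this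

theorem len_nonneg (w : String) : 0 ≤ PySem.Str.len w := by
  simp [PySem.Str.len_eq]

-- the argmax scan never lowers its best value
theorem scan_bound (words : List String) (l : List (Int × (Int × Int))) (s : Int × Int) (B : Int)
    (hs : s.2 ≤ B)
    (h : ∀ p ∈ l, PySem.Str.len ((PySem.List.pyGet? words p.2.1).getD "") - p.2.2 ≤ B) :
    ((l.foldl (lfeStep words) s).2) ≤ B := by
  induction l generalizing s with
  | nil => simpa using hs
  | cons p t ih =>
    have hp := h p (by simp)
    refine ih _ ?_ (fun q hq => h q (by simp [hq]))
    unfold lfeStep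
    split_ifs <;> simp_all

theorem scan_skip (words : List String) (l : List (Int × (Int × Int))) (s : Int × Int)
    (h : ∀ p ∈ l, PySem.Str.len ((PySem.List.pyGet? words p.2.1).getD "") - p.2.2 ≤ s.2) :
    l.foldl (lfeStep words) s = s := by
  induction l with
  | nil => rfl
  | cons p t ih =>
    have hp := h p (by simp)
    have hstep : lfeStep words s p = s := by
      unfold lfeStep; split_ifs <;> simp_all <;> omega
    rw [List.foldl_cons, hstep, ih (fun q hq => h q (by simp [hq]))]

theorem lfeFuel_append (r k : Int) (xs ys : List String) (i0 : Int) :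
    lfeFuel r k (xs ++ ys) i0 = lfeFuel r k xs i0 + lfeFuel r k ys (i0 + xs.length) := by
  induction xs generalizing i0 with
  | nil => simp [lfeFuel]
  | cons w t ih => simp [lfeFuel, ih, add_comm, add_assoc, add_left_comm]


theorem lfeFuel_congr (r k k' : Int) (ws : List String) : ∀ (i0 : Int),
    (∀ (j : Nat) (hj : j < ws.length),
      ((i0 + j < k) = (i0 + j < k')) ∨ PySem.Str.len ws[j] < r) →
    lfeFuel r k ws i0 = lfeFuel r k' ws i0 := by
  induction ws with
  | nil => intro i0 _; rfl
  | cons w t ih =>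
    intro i0 h
    have h0 := h 0 (by simp)
    have ht : ∀ (j : Nat) (hj : j < t.length),
        ((i0 + 1 + j < k) = (i0 + 1 + j < k')) ∨ PySem.Str.len t[j] < r := by
      intro j hj
      have := h (j + 1) (by simpa using Nat.succ_lt_succ hj)
      simpa [add_assoc, add_comm, add_left_comm] using this
    simp only [lfeFuel, ih (i0 + 1) ht]
    congr 1
    simp only [Nat.cast_zero, add_zero, List.getElem_cons_zero] at h0
    rcases h0 with h0 | h0
    · simp only [iff_of_eq h0]
    · simp only [PySem.Str.len_eq] at h0 ⊢
      split_ifs <;> omega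

theorem lfeState_shift (r : Int) (k : Nat) (ws : List String) (hr : 2 ≤ r) : ∀ (i0 : Int), 0 ≤ i0 →
    (∀ (j : Nat) (hj : j < ws.length), (k : Int) ≤ i0 + j → PySem.Str.len ws[j] < r) →
    lfeState r k ws i0 = lfeState (r - 1) 0 ws i0 := by
  induction ws with
  | nil => intro i0 _ _; rfl
  | cons w t ih =>
    intro i0 hi0 h
    have h0 := h 0 (by simp)
    have ht : ∀ (j : Nat) (hj : j < t.length), (k : Int) ≤ (i0 + 1) + j → PySem.Str.len t[j] < r := by
      intro j hj hkj
      have := h (j + 1) (by simpa using Nat.succ_lt_succ hj)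
      simp only [Nat.cast_add, Nat.cast_one, List.getElem_cons_succ] at this
      exact this (by omega)
    simp only [lfeState, ih (i0 + 1) (by omega) ht]
    congr 1
    simp only [Prod.mk.injEq, true_and]
    have hL0 : 0 ≤ PySem.Str.len w := len_nonneg w
    simp only [Nat.cast_zero, add_zero, List.getElem_cons_zero] at h0
    unfold lfeChar
    have hne : ¬ i0 < (0 : Int) := by omega
    by_cases hc : r ≤ PySem.Str.len w
    · have hik : i0 < (k : Int) := by
        by_contra hh
        have := h0 (by omega)
        omega
      have hc2 : r - 1 ≤ PySem.Str.len w := by omega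
      rw [if_pos hc, if_pos hc2, if_pos (by simpa using hik), if_neg (by simpa using hne)]
      omega
    · by_cases hc2 : r - 1 ≤ PySem.Str.len w
      · rw [if_neg hc, if_pos hc2, if_neg (by simpa using hne)]
        omega
      · rw [if_neg hc, if_neg hc2]

theorem lfeFuel_shift (r : Int) (k : Nat) (ws : List String) (hr : 2 ≤ r) : ∀ (i0 : Int), 0 ≤ i0 →
    (∀ (j : Nat) (hj : j < ws.length), (k : Int) ≤ i0 + j → PySem.Str.len ws[j] < r) →
    lfeFuel r k ws i0 = lfeFuel (r - 1) 0 ws i0 := by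
  induction ws with
  | nil => intro i0 _ _; rfl
  | cons w t ih =>
    intro i0 hi0 h
    have h0 := h 0 (by simp)
    have ht : ∀ (j : Nat) (hj : j < t.length), (k : Int) ≤ (i0 + 1) + j → PySem.Str.len t[j] < r := by
      intro j hj hkj
      have := h (j + 1) (by simpa using Nat.succ_lt_succ hj)
      simp only [Nat.cast_add, Nat.cast_one, List.getElem_cons_succ] at this
      exact this (by omega)
    simp only [lfeFuel, ih (i0 + 1) (by omega) ht]
    congr 1
    have hL0 : 0 ≤ PySem.Str.len w := len_nonneg w
    simp only [Nat.cast_zero, add_zero, List.getElem_cons_zero] at h0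
    have hne : ¬ i0 < (0 : Int) := by omega
    by_cases hc : r ≤ PySem.Str.len w
    · have hik : i0 < (k : Int) := by
        by_contra hh
        have := h0 (by omega)
        omega
      have hc2 : r - 1 ≤ PySem.Str.len w := by omega
      rw [if_pos hc, if_pos hc2, if_pos hik, if_neg hne]
      omega
    · by_cases hc2 : r - 1 ≤ PySem.Str.len w
      · rw [if_neg hc, if_pos hc2]
        omega
      · rw [if_neg hc, if_neg hc2]

theorem lfeFuel_one_zero (k : Int) (ws : List String) : ∀ (i0 : Int),
    (∀ (j : Nat) (hj : j < ws.length), k ≤ i0 + j → PySem.Str.len ws[j] ≤ 0) →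
    lfeFuel 1 k ws i0 = 0 := by
  induction ws with
  | nil => intro i0 _; rfl
  | cons w t ih =>
    intro i0 h
    have h0 := h 0 (by simp)
    have ht : ∀ (j : Nat) (hj : j < t.length), k ≤ (i0 + 1) + j → PySem.Str.len t[j] ≤ 0 := by
      intro j hj hkj
      have := h (j + 1) (by simpa using Nat.succ_lt_succ hj)
      simp only [Nat.cast_add, Nat.cast_one, List.getElem_cons_succ] at this
      exact this (by omega)
    have hL0 : 0 ≤ PySem.Str.len w := len_nonneg w
    simp only [Nat.cast_zero, add_zero, List.getElem_cons_zero] at h0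
    simp only [lfeFuel, ih (i0 + 1) ht, Nat.add_zero]
    by_cases hc : (1 : Int) ≤ PySem.Str.len w
    · have hik : i0 < k := by
        by_contra hh
        have := h0 (by omega)
        omega
      rw [if_pos hc, if_pos hik]
      simp
    · rw [if_neg hc]
      omega

theorem lfePhase_nil (r : Int) (xs : List String)
    (h : ∀ w ∈ xs, PySem.Str.len w < r) : lfePhase r xs = [] := by
  unfold lfePhase
  rw [List.filterMap_eq_nil_iff]
  intro w hw
  have hn : ¬ PySem.Str.len w ≥ r := not_le.mpr (h w hw)
  rw [if_neg hn]

-- remaining length the scan computes for the entry of word j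
theorem remain_at (r : Int) (k : Nat) (ws : List String) (j : Nat) (hj : j < ws.length) :
    PySem.Str.len ((PySem.List.pyGet? ws ((j : Int))).getD "")
      - lfeChar ws[j] r (decide ((j : Int) < (k : Int)))
    = if r ≤ PySem.Str.len ws[j] then (if j < k then r - 1 else r) else PySem.Str.len ws[j] := by
  rw [PySem.List.pyGet?_natCast, List.getElem?_eq_getElem hj]
  have hjk : ((j : Int) < (k : Int)) ↔ j < k := by push_cast; omega
  unfold lfeChar
  by_cases hc : r ≤ PySem.Str.len ws[j]
  · by_cases hk : j < k
    · rw [if_pos hc, if_pos hc, if_pos hk, if_pos (by simpa using hjk.mpr hk)]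
      simp only [Option.getD_some]
      omega
    · rw [if_pos hc, if_pos hc, if_neg hk, if_neg (by simpa using fun h => hk (hjk.mp h))]
      simp only [Option.getD_some]
      omega
  · rw [if_neg hc, if_neg hc]
    simp only [Option.getD_some]
    omega

theorem scan_eq (r : Int) (k i0 : Nat) (ws : List String)
    (hr : 1 ≤ r) (hi : i0 < ws.length) (hk : k ≤ i0)
    (hL : r ≤ PySem.Str.len ws[i0])
    (hmin : ∀ (j : Nat) (hj : j < ws.length), k ≤ j → j < i0 → PySem.Str.len ws[j] < r) :
    (PySem.List.enumerate (lfeState r k ws 0)).foldl (lfeStep ws) (-1, -1) = ((i0 : Int), r) := by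
  have hSlen : (lfeState r k ws 0).length = ws.length := length_lfeState r k ws 0
  have hi' : i0 < (lfeState r k ws 0).length := by omega
  have hsplit : lfeState r k ws 0
      = (lfeState r k ws 0).take i0 ++ (lfeState r k ws 0)[i0] :: (lfeState r k ws 0).drop (i0 + 1) := by
    conv_lhs => rw [← List.take_append_drop i0 (lfeState r k ws 0)]
    rw [List.drop_eq_getElem_cons hi']
  have htake : ((lfeState r k ws 0).take i0).length = i0 := by
    simp [hSlen]; omega
  rw [hsplit, PySem.List.enumerate_append, List.foldl_append, PySem.List.enumerate_cons,
      List.foldl_cons]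
  simp only [htake, zero_add]
  -- prefix scan stays below r
  have hpre : ((PySem.List.enumerate ((lfeState r k ws 0).take i0) 0).foldl (lfeStep ws)
      (-1, -1)).2 ≤ r - 1 := by
    apply scan_bound ws _ _ (r - 1) (by norm_num; omega)
    intro p hp
    obtain ⟨m, hm, rfl⟩ := (PySem.List.mem_enumerate_iff _ _ _).mp hp
    rw [htake] at hm
    have hmw : m < ws.length := by omega
    rw [List.getElem_take, getElem_lfeState r k ws 0 m hmw]
    simp only [zero_add]
    rw [remain_at r k ws m hmw]
    by_cases hc : r ≤ PySem.Str.len ws[m]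
    · have hmk : m < k := by
        by_contra hh
        exact absurd hc (not_le.mpr (hmin m hmw (by omega) (by omega)))
      rw [if_pos hc, if_pos hmk]
    · rw [if_neg hc]
      omega
  -- pivot step selects (i0, r)
  have hpivot : lfeStep ws ((PySem.List.enumerate ((lfeState r k ws 0).take i0) 0).foldl
      (lfeStep ws) (-1, -1)) ((i0 : Int), (lfeState r k ws 0)[i0]) = ((i0 : Int), r) := by
    rw [getElem_lfeState r k ws 0 i0 hi]
    simp only [lfeStep, zero_add]
    rw [remain_at r k ws i0 hi, if_pos hL, if_neg (show ¬ i0 < k by omega)]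
    rw [if_neg (show ¬ r ≤ 0 by omega), if_pos (by omega)]
  rw [hpivot]
  -- suffix never beats r
  apply scan_skip
  intro p hp
  obtain ⟨m, hm, rfl⟩ := (PySem.List.mem_enumerate_iff _ _ _).mp hp
  simp only [List.length_drop] at hm
  have hmw : i0 + 1 + m < ws.length := by omega
  rw [List.getElem_drop, getElem_lfeState r k ws 0 (i0 + 1 + m) hmw]
  simp only [zero_add]
  rw [remain_at r k ws (i0 + 1 + m) hmw]
  have hLm := len_nonneg ws[i0 + 1 + m]
  split_ifs <;> omega

theorem lfeState_set (r : Int) (k i0 : Nat) (ws : List String)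
    (hi : i0 < ws.length) (hk : k ≤ i0)
    (hL : r ≤ PySem.Str.len ws[i0])
    (hmin : ∀ (j : Nat) (hj : j < ws.length), k ≤ j → j < i0 → PySem.Str.len ws[j] < r) :
    (lfeState r k ws 0).set i0 ((i0 : Int), (PySem.Str.len ws[i0] - r) + 1)
      = lfeState r (i0 + 1 : Nat) ws 0 := by
  apply List.ext_getElem
  · simp [length_lfeState]
  · intro j hj1 hj2
    have hjw : j < ws.length := by simpa [length_lfeState] using hj2
    rw [List.getElem_set, getElem_lfeState r (i0 + 1 : Nat) ws 0 j hjw]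
    by_cases hji : i0 = j
    · subst hji
      rw [if_pos rfl]
      have : ((0 : Int) + (i0 : Int) < ((i0 + 1 : Nat) : Int)) := by push_cast; omega
      unfold lfeChar
      rw [if_pos hL, if_pos (by simpa using this)]
      simp
    · rw [if_neg hji, getElem_lfeState r k ws 0 j hjw]
      congr 1
      unfold lfeChar
      by_cases hc : r ≤ PySem.Str.len ws[j]
      · have hsame : ((0 : Int) + (j : Int) < (k : Int)) ↔ ((0 : Int) + (j : Int) < ((i0 + 1 : Nat) : Int)) := by
          constructor
          · intro h; push_cast at h ⊢; omega
          · intro h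
            push_cast at h ⊢
            by_contra hh
            have hj0 : k ≤ j := by omega
            have hji0 : j < i0 := by omega
            exact absurd hc (not_le.mpr (hmin j hjw hj0 hji0))
        by_cases hjk : ((0 : Int) + (j : Int) < (k : Int))
        · rw [if_pos hc, if_pos hc, if_pos (by simpa using hjk), if_pos (by simpa using hsame.mp hjk)]
        · rw [if_pos hc, if_pos hc, if_neg (by simpa using hjk),
              if_neg (by simpa using fun h => hjk (hsame.mpr h))]
      · rw [if_neg hc, if_neg hc]

theorem lfeFuel_emit (r : Int) (k i0 : Nat) (ws : List String)
    (hr : 1 ≤ r) (hi : i0 < ws.length) (hk : k ≤ i0)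
    (hL : r ≤ PySem.Str.len ws[i0])
    (hmin : ∀ (j : Nat) (hj : j < ws.length), k ≤ j → j < i0 → PySem.Str.len ws[j] < r) :
    lfeFuel r k ws 0 = lfeFuel r (i0 + 1 : Nat) ws 0 + 1 := by
  have hsplit : ws = ws.take i0 ++ ws[i0] :: ws.drop (i0 + 1) := by
    conv_lhs => rw [← List.take_append_drop i0 ws]
    rw [List.drop_eq_getElem_cons hi]
  have htake : (ws.take i0).length = i0 := by simp; omega
  conv_lhs => rw [hsplit]
  conv_rhs => rw [hsplit]
  rw [lfeFuel_append, lfeFuel_append, htake]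
  have hpre : lfeFuel r k (ws.take i0) 0 = lfeFuel r (i0 + 1 : Nat) (ws.take i0) 0 := by
    apply lfeFuel_congr
    intro j hj
    rw [htake] at hj
    have hjw : j < ws.length := by omega
    rw [List.getElem_take]
    by_cases hjk : j < k
    · exact Or.inl (by rw [eq_iff_iff]; push_cast; omega)
    · exact Or.inr (hmin j hjw (by omega) (by omega))
  rw [hpre]
  simp only [lfeFuel]
  have hmid1 : ¬ ((0 : Int) + (i0 : Int) < (k : Int)) := by push_cast; omega
  have hmid2 : ((0 : Int) + (i0 : Int) < ((i0 + 1 : Nat) : Int)) := by push_cast; omega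
  rw [if_pos hL, if_pos hL, if_neg hmid1, if_pos hmid2]
  have hsuf : lfeFuel r k (ws.drop (i0 + 1)) (0 + (i0 : Int) + 1)
      = lfeFuel r (i0 + 1 : Nat) (ws.drop (i0 + 1)) (0 + (i0 : Int) + 1) := by
    apply lfeFuel_congr
    intro j hj
    exact Or.inl (by rw [eq_iff_iff]; push_cast; omega)
  rw [hsuf]
  omega

theorem lfePhase_emit (r : Int) (k i0 : Nat) (ws : List String)
    (hi : i0 < ws.length) (hk : k ≤ i0)
    (hL : r ≤ PySem.Str.len ws[i0])
    (hmin : ∀ (j : Nat) (hj : j < ws.length), k ≤ j → j < i0 → PySem.Str.len ws[j] < r)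
    (c : Char) (hc : PySem.Str.pyGet? ws[i0] (PySem.Str.len ws[i0] - r) = some c) :
    lfePhase r (ws.drop k) = String.ofList [c] :: lfePhase r (ws.drop (i0 + 1)) := by
  have hsplit : ws.drop k = (ws.drop k).take (i0 - k) ++ ws[i0] :: ws.drop (i0 + 1) := by
    conv_lhs => rw [← List.take_append_drop (i0 - k) (ws.drop k)]
    congr 1
    rw [List.drop_drop]
    have h2 : k + (i0 - k) = i0 := by omega
    rw [h2, List.drop_eq_getElem_cons hi]
  rw [hsplit]
  unfold lfePhase
  rw [List.filterMap_append]
  have hpre : List.filterMap (fun w =>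
      if PySem.Str.len w ≥ r then
        (PySem.Str.pyGet? w (PySem.Str.len w - r)).map (fun c => String.ofList [c])
      else none) ((ws.drop k).take (i0 - k)) = [] := by
    have := lfePhase_nil r ((ws.drop k).take (i0 - k)) ?_
    · simpa [lfePhase] using this
    · intro w hw
      obtain ⟨m, hm, rfl⟩ := List.mem_iff_getElem.mp hw
      rw [List.getElem_take, List.getElem_drop]
      have hmlen : (((ws.drop k).take (i0 - k)).length) = i0 - k := by
        simp [List.length_drop]; omega
      rw [hmlen] at hm
      exact hmin (k + m) (by omega) (by omega) (by omega)
  rw [hpre, List.nil_append, List.filterMap_cons]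
  rw [if_pos hL, hc]
  rfl

theorem lfe_main (ws : List String) : ∀ (M : Nat) (r k : Nat) (q : List String),
    r * (ws.length + 1) + (ws.length - k) ≤ M → 1 ≤ r → k ≤ ws.length →
    lfeLoop ws (lfeState (r : Int) (k : Int) ws 0) q (lfeFuel (r : Int) (k : Int) ws 0)
      = q ++ lfePhase (r : Int) (ws.drop k) ++ lfeRest ws (r - 1) := by
  intro M
  induction M with
  | zero =>
    intro r k q hM hr hk
    exfalso
    have h1 : 0 < r * (ws.length + 1) := Nat.mul_pos (by omega) (by omega)
    omega
  | succ M ih =>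
    intro r k q hM hr hk
    by_cases hex : ∃ j : Nat, k ≤ j ∧ j < ws.length ∧ (r : Int) ≤ PySem.Str.len (ws[j]?.getD "")
    · -- a word with remaining length ≥ r exists at or after k: one emission step
      obtain ⟨hk0, hilen, hL0⟩ := Nat.find_spec hex
      set i0 := Nat.find hex with hi0def
      have hL : (r : Int) ≤ PySem.Str.len ws[i0] := by
        rwa [List.getElem?_eq_getElem hilen, Option.getD_some] at hL0
      have hmin : ∀ (j : Nat) (hj : j < ws.length), k ≤ j → j < i0 → PySem.Str.len ws[j] < r := by
        intro j hj hkj hji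
        have hnm := Nat.find_min hex hji
        push_neg at hnm
        have h2 := hnm hkj hj
        rwa [List.getElem?_eq_getElem hj, Option.getD_some] at h2
      have hlen0 : 0 ≤ PySem.Str.len ws[i0] := len_nonneg _
      have hlenl : PySem.Str.len ws[i0] = (ws[i0].toList.length : Int) := by
        simp [PySem.Str.len_eq]
      obtain ⟨c, hc⟩ : ∃ c, PySem.Str.pyGet? ws[i0] (PySem.Str.len ws[i0] - r) = some c := by
        cases hopt : PySem.Str.pyGet? ws[i0] (PySem.Str.len ws[i0] - r) with
        | some c => exact ⟨c, rfl⟩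
        | none =>
          exfalso
          have h1 : PySem.List.pyGet? ws[i0].toList (PySem.Str.len ws[i0] - r) = none := by
            simpa using hopt
          rw [PySem.List.pyGet?_eq_none_iff] at h1
          exact h1 (by unfold PySem.Raise.InRange; omega)
      rw [lfeFuel_emit r k i0 ws (by exact_mod_cast hr) hilen hk0 hL hmin]
      simp only [lfeLoop]
      rw [scan_eq r k i0 ws (by exact_mod_cast hr) hilen hk0 hL hmin]
      have hptr : PySem.List.pyGet? (lfeState (r : Int) (k : Int) ws 0) ((i0 : Nat) : Int)
          = some (((i0 : Nat) : Int), PySem.Str.len ws[i0] - r) := by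
        rw [PySem.List.pyGet?_natCast,
            List.getElem?_eq_getElem (show i0 < (lfeState (r : Int) (k : Int) ws 0).length by
              rw [length_lfeState]; exact hilen)]
        rw [getElem_lfeState r k ws 0 i0 hilen]
        simp only [zero_add]
        have hch : lfeChar ws[i0] (r : Int) (decide (((i0 : Nat) : Int) < ((k : Nat) : Int)))
            = PySem.Str.len ws[i0] - r := by
          unfold lfeChar
          rw [if_pos hL, if_neg (by simp; push_cast; omega)]
        rw [hch]
      have hwsi : PySem.List.pyGet? ws ((i0 : Nat) : Int) = some ws[i0] := by
        rw [PySem.List.pyGet?_natCast, List.getElem?_eq_getElem hilen]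
      simp only [hptr, hwsi, hc]
      have hjj : (if ((i0 : Nat) : Int) < 0
          then ((lfeState (r : Int) (k : Int) ws 0).length : Int) + ((i0 : Nat) : Int)
          else ((i0 : Nat) : Int)).toNat = i0 := by
        rw [if_neg (by omega)]
        simp
      rw [hjj, lfeState_set r k i0 ws hilen hk0 hL hmin]
      have hmeas : r * (ws.length + 1) + (ws.length - (i0 + 1)) ≤ M := by
        have e1 : ws.length - (i0 + 1) + 1 ≤ ws.length - k := by omega
        have e2 := Nat.add_le_add_left e1 (r * (ws.length + 1))
        rw [← Nat.add_assoc] at e2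
        exact Nat.le_of_succ_le_succ (Nat.le_trans e2 hM)
      rw [ih r (i0 + 1) (q ++ [String.ofList [c]]) hmeas hr (by omega)]
      rw [lfePhase_emit r k i0 ws hilen hk0 hL hmin c hc]
      simp
    · -- no word at or after k still has r characters left: phase (or loop) ends
      push_neg at hex
      have hall : ∀ (j : Nat) (hj : j < ws.length), ((k : Nat) : Int) ≤ 0 + (j : Int) →
          PySem.Str.len ws[j] < r := by
        intro j hj hkj
        have hkj' : k ≤ j := by push_cast at hkj; omega
        have h2 := hex j hkj' hj
        rwa [List.getElem?_eq_getElem hj, Option.getD_some] at h2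
      have hdropall : ∀ w ∈ ws.drop k, PySem.Str.len w < r := by
        intro w hw
        obtain ⟨m, hm, rfl⟩ := List.mem_iff_getElem.mp hw
        rw [List.getElem_drop]
        have hm' : k + m < ws.length := by
          simp [List.length_drop] at hm
          omega
        exact hall (k + m) hm' (by push_cast; omega)
      by_cases hr1 : r = 1
      · subst hr1
        have hf : lfeFuel ((1 : Nat) : Int) ((k : Nat) : Int) ws 0 = 0 := by
          apply lfeFuel_one_zero
          intro j hj hkj
          have h2 := hall j hj (by push_cast at hkj ⊢; omega)
          push_cast at h2
          omega
        rw [hf]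
        simp only [lfeLoop]
        rw [lfePhase_nil _ _ (by push_cast; exact hdropall)]
        simp [lfeRest]
      · have hr2 : (2 : Int) ≤ (r : Int) := by push_cast; omega
        rw [lfeState_shift (r : Int) k ws hr2 0 (le_refl 0) hall,
            lfeFuel_shift (r : Int) k ws hr2 0 (le_refl 0) hall]
        have hcast : ((r : Nat) : Int) - 1 = (((r - 1 : Nat)) : Int) := by push_cast [Nat.cast_sub hr]; ring
        have hmeas : (r - 1) * (ws.length + 1) + (ws.length - 0) ≤ M := by
          have f1 : (r - 1) * (ws.length + 1) + (ws.length + 1) = r * (ws.length + 1) := by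
            conv_rhs => rw [← Nat.sub_add_cancel hr]
            ring
          have f2 : r * (ws.length + 1) ≤ M + 1 := le_trans (Nat.le_add_right _ _) hM
          have f3 : (r - 1) * (ws.length + 1) + (ws.length - 0) + 1 = r * (ws.length + 1) := by
            rw [Nat.sub_zero, Nat.add_assoc, f1]
          have f4 : (r - 1) * (ws.length + 1) + (ws.length - 0) + 1 ≤ M + 1 := by
            rw [f3]; exact f2
          exact Nat.le_of_succ_le_succ f4
        have IH := ih (r - 1) 0 q hmeas (by omega) (by omega)
        simp only [Nat.cast_zero] at IH
        rw [hcast, IH, lfePhase_nil (r : Int) (ws.drop k) hdropall, List.drop_zero]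
        conv_rhs => rw [show r - 1 = (r - 2) + 1 from by omega]
        simp only [lfeRest]
        rw [show (((r - 2 : Nat)) : Int) + 1 = (((r - 1 : Nat)) : Int) from by push_cast; omega,
            show r - 1 - 1 = r - 2 from by omega]
        simp

theorem foldl_max_le (l : List Int) : ∀ b : Int, b ≤ l.foldl max b ∧ ∀ x ∈ l, x ≤ l.foldl max b := by
  induction l with
  | nil => intro b; exact ⟨le_refl b, by simp⟩
  | cons x t ih =>
    intro b
    obtain ⟨h1, h2⟩ := ih (max b x)
    refine ⟨le_trans (le_max_left b x) h1, ?_⟩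
    intro y hy
    rcases List.mem_cons.mp hy with rfl | hy
    · exact le_trans (le_max_right b y) h1
    · exact h2 y hy

theorem init_state (ws : List String) (R : Nat)
    (hmax : ∀ w ∈ ws, PySem.Str.len w ≤ (R : Int)) :
    (PySem.List.pyRange 0 (ws.length : Int) 1).map (fun i => (i, (0 : Int)))
      = lfeState (R : Int) 0 ws 0 := by
  apply List.ext_getElem
  · simp [length_lfeState, PySem.List.length_pyRange_one]
  · intro j hj1 hj2
    have hjw : j < ws.length := by simpa [length_lfeState] using hj2
    rw [List.getElem_map, PySem.List.getElem_pyRange_one, getElem_lfeState (R : Int) 0 ws 0 j hjw]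
    have hflag : ¬ ((0 : Int) + (j : Int) < (0 : Int)) := by omega
    have hch : lfeChar ws[j] (R : Int) (decide ((0 : Int) + (j : Int) < (0 : Int))) = 0 := by
      unfold lfeChar
      by_cases hc : (R : Int) ≤ PySem.Str.len ws[j]
      · have : PySem.Str.len ws[j] = (R : Int) := le_antisymm (hmax _ (ws.getElem_mem hjw)) hc
        rw [if_pos hc, if_neg (by simpa using hflag)]
        omega
      · rw [if_neg hc]
    rw [hch]

theorem init_fuel (ws : List String) (R : Nat)
    (hmax : ∀ w ∈ ws, PySem.Str.len w ≤ (R : Int)) : ∀ (i0 : Int), 0 ≤ i0 →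
    ((ws.map (fun w => PySem.Str.len w)).sum).toNat = lfeFuel (R : Int) 0 ws i0 := by
  induction ws with
  | nil => intro i0 _; rfl
  | cons w t ih =>
    intro i0 hi0
    have hw := hmax w (by simp)
    have ht : ∀ x ∈ t, PySem.Str.len x ≤ (R : Int) := fun x hx => hmax x (by simp [hx])
    have hwn : 0 ≤ PySem.Str.len w := len_nonneg w
    have htn : 0 ≤ (t.map (fun w => PySem.Str.len w)).sum := by
      apply List.sum_nonneg
      intro x hx
      obtain ⟨y, hy, rfl⟩ := List.mem_map.mp hx
      exact len_nonneg y
    have hrec := ih ht (i0 + 1) (by omega)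
    simp only [List.map_cons, List.sum_cons, lfeFuel]
    rw [← hrec]
    have hne : ¬ (i0 < (0 : Int)) := by omega
    rw [if_neg hne]
    by_cases hc : (R : Int) ≤ PySem.Str.len w
    · have hwR : PySem.Str.len w = (R : Int) := le_antisymm hw hc
      rw [if_pos hc]
      omega
    · rw [if_neg hc]
      omega

theorem alt_eq_lfeRest (ws : List String) : ∀ (R : Nat),
    (PySem.List.pyRange (R : Int) 0 (-1)).flatMap (fun r => ws.filterMap (fun w =>
      if PySem.Str.len w ≥ r then
        (PySem.Str.pyGet? w (PySem.Str.len w - r)).map (fun c => String.ofList [c])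
      else none))
    = lfeRest ws R := by
  intro R
  induction R with
  | zero => rw [PySem.List.pyRange_neg_one_eq_nil (by omega)]; rfl
  | succ R ih =>
    rw [PySem.List.pyRange_neg_one_cons (by push_cast; omega), List.flatMap_cons]
    have hcast : (((R + 1 : Nat)) : Int) - 1 = (R : Int) := by push_cast; ring
    rw [hcast, ih]
    rfl

-- ===== VERDICT (by name: the statement is the Claim_ definition above) =====
theorem longest_first_extraction_spec : Claim_equal_longest_first_extraction := by
  intro ws _hdom
  unfold Spec_longest_first_extraction
  simp only [longest_first_extraction, longest_first_extraction_alt]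
  have hmax := foldl_max_le (ws.map PySem.Str.len) 0
  generalize hR : (ws.map PySem.Str.len).foldl max 0 = R at hmax ⊢
  obtain ⟨hR0, hRmax⟩ := hmax
  have hmaxall : ∀ w ∈ ws, PySem.Str.len w ≤ R := by
    intro w hw
    exact hRmax _ (List.mem_map_of_mem hw)
  have hRcast : R = ((R.toNat : Nat) : Int) := by omega
  rw [hRcast] at hmaxall ⊢
  by_cases h0 : R.toNat = 0
  · have hz : ∀ w ∈ ws, PySem.Str.len w = 0 := by
      intro w hw
      have h1 := hmaxall w hw
      have h2 := len_nonneg w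
      omega
    have hsum : (ws.map (fun w => PySem.Str.len w)).sum = 0 := by
      apply List.sum_eq_zero
      intro x hx
      obtain ⟨y, hy, rfl⟩ := List.mem_map.mp hx
      exact hz y hy
    rw [hsum, PySem.List.pyRange_neg_one_eq_nil (by push_cast; omega)]
    simp [lfeLoop]
  · have h1 : 1 ≤ R.toNat := by omega
    rw [init_state ws R.toNat hmaxall,
        init_fuel ws R.toNat hmaxall 0 (le_refl 0),
        alt_eq_lfeRest ws R.toNat]
    have HM := lfe_main ws (R.toNat * (ws.length + 1) + ws.length) R.toNat 0 []
      (le_of_eq (by rw [Nat.sub_zero])) h1 (by omega)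
    simp only [Nat.cast_zero] at HM
    rw [HM]
    simp only [List.drop_zero, List.nil_append]
    conv_rhs => rw [show R.toNat = (R.toNat - 1) + 1 from by omega]
    simp only [lfeRest]
    rw [show ((((R.toNat - 1) : Nat)) : Int) + 1 = (((R.toNat : Nat)) : Int) from by push_cast; omega]
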